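-- pv_equiv track=rewrite | github.com/neo-rs/MWBots | MWDiscumBot/post_mirror_channel_map.py | build_by_guild
-- ===== SOURCE A (Python) =====
-- from typing import Any, Dict, List, Optional, Tuple
--
-- def build_by_guild(
--     channel_map: Dict[int, str],
--     ch_to_guild: Dict[int, int],
--     ch_to_name: Dict[int, str],
--     guild_to_name: Dict[int, str],
--     webhook_dest_cache: Dict[str, Tuple[Optional[int], str]],
-- ) -> List[Tuple[int, str, List[Tuple[Optional[int], str, List[Tuple[str, int]]]]]]:
--     """
--     Returns list of (guild_id, guild_name, destination_buckets) sorted by guild name.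
--     destination_buckets item: (dest_cid, dest_display, [(source_name, source_cid), ...])
--     """
--     by_guild: Dict[int, List[Tuple[int, str]]] = {}
--     for src_cid, wh_url in channel_map.items():
--         if not wh_url:
--             continue
--         gid = ch_to_guild.get(src_cid, 0)
--         if gid <= 0:
--             gid = 0
--         by_guild.setdefault(gid, []).append((src_cid, wh_url))
--
--     result: List[Tuple[int, str, List[Tuple[Optional[int], str, List[Tuple[str, int]]]]]] = []
--     for gid in sorted(by_guild.keys(), key=lambda x: guild_to_name.get(x, "").lower()):
--         gname = guild_to_name.get(gid, f"Guild-{gid}" if gid else "Unknown guild")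
--         grouped_dest: Dict[str, Tuple[Optional[int], str, List[Tuple[str, int]]]] = {}
--         for src_cid, wh_url in by_guild[gid]:
--             src_name = ch_to_name.get(src_cid, f"channel-{src_cid}")
--             dest_cid, dest_name = webhook_dest_cache.get(wh_url, (None, "?"))
--             dest_display = f"<#{dest_cid}>" if dest_cid else (dest_name or "?")
--             key = str(dest_cid) if dest_cid else f"name:{dest_name}"
--             if key not in grouped_dest:
--                 grouped_dest[key] = (dest_cid, dest_display, [])
--             grouped_dest[key][2].append((src_name, src_cid))
--
--         buckets = list(grouped_dest.values())
--         # Sort destinations by rendered display; sources by source channel name.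
--         buckets.sort(key=lambda b: (str(b[1]).lower(), int(b[0] or 0)))
--         for idx, (dcid, ddisp, srcs) in enumerate(buckets):
--             srcs.sort(key=lambda s: (s[0].lower(), s[1]))
--             buckets[idx] = (dcid, ddisp, srcs)
--         result.append((gid, gname, buckets))
--     return result
-- ===== SOURCE B (Python) =====
-- def build_by_guild(channel_map, ch_to_guild, ch_to_name, guild_to_name, webhook_dest_cache):
--     # One flat annotation pass, then grouping by dedup+filter instead of nested dict accumulation.
--     rows = []
--     for src_cid, wh_url in channel_map.items():
--         if not wh_url:
--             continue
--         gid = ch_to_guild.get(src_cid, 0)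
--         if gid <= 0:
--             gid = 0
--         src_name = ch_to_name.get(src_cid, f"channel-{src_cid}")
--         dest_cid, dest_name = webhook_dest_cache.get(wh_url, (None, "?"))
--         dest_display = f"<#{dest_cid}>" if dest_cid else (dest_name or "?")
--         key = str(dest_cid) if dest_cid else f"name:{dest_name}"
--         rows.append((gid, key, dest_cid, dest_display, src_name, src_cid))
--
--     gids = sorted(dict.fromkeys(r[0] for r in rows),
--                   key=lambda g: guild_to_name.get(g, "").lower())
--     result = []
--     for gid in gids:
--         grows = [r for r in rows if r[0] == gid]
--         buckets = []
--         for key in dict.fromkeys(r[1] for r in grows):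
--             krows = [r for r in grows if r[1] == key]
--             srcs = sorted(((r[4], r[5]) for r in krows),
--                           key=lambda s: (s[0].lower(), s[1]))
--             buckets.append((krows[0][2], krows[0][3], srcs))
--         buckets.sort(key=lambda b: (b[1].lower(), int(b[0] or 0)))
--         gname = guild_to_name.get(gid, f"Guild-{gid}" if gid else "Unknown guild")
--         result.append((gid, gname, buckets))
--     return result
-- ===== Notes on version B (the rewrite author's own statement) =====
-- stated objective: alternative
-- what changed: A accumulates a dict of per-guild lists and then a per-guild dict of destination buckets; B makes one flat annotation pass producing rows and then groups by ordered dedup of keys plus filters, with sources sorted before (not after) the bucket sort.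
import Mathlib
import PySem

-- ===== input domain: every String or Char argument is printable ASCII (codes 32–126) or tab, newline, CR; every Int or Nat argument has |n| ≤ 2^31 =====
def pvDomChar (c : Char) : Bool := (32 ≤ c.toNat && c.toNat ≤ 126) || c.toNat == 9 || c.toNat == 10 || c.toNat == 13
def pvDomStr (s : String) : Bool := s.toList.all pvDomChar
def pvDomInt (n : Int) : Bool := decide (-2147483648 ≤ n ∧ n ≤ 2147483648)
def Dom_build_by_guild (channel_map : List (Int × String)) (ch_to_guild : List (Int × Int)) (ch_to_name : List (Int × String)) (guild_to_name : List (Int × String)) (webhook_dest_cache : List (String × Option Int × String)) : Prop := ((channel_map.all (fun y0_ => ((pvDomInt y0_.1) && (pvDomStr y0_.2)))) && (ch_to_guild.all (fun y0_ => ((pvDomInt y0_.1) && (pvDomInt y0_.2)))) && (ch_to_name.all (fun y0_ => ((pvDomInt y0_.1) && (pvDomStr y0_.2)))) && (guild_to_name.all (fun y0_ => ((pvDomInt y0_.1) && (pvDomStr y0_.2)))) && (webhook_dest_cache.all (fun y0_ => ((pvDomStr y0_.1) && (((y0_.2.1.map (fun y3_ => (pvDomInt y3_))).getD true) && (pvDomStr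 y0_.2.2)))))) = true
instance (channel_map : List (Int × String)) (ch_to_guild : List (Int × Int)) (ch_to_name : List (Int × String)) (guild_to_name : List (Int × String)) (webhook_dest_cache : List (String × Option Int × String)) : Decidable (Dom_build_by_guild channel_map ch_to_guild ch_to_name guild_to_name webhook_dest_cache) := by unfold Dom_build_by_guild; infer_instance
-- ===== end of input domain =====

-- B re-implements build_by_guild with one flat annotation pass and dedup+filter grouping
-- instead of A's two nested dict-accumulation passes (objective: alternative, same cost).

-- ===== PORT A =====
-- .get(k, dflt) of a Python dict argument (assoc list, first match)
def pvGetD {κ ν : Type} [BEq κ] (l : List (κ × ν)) (k : κ) (dflt : ν) : ν :=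
  (PySem.Dict.mk l).getD k dflt

-- Port of A: two dict-accumulation passes (by_guild, then grouped_dest per guild).
def build_by_guild (channel_map : List (Int × String)) (ch_to_guild : List (Int × Int)) (ch_to_name : List (Int × String)) (guild_to_name : List (Int × String)) (webhook_dest_cache : List (String × Option Int × String)) : List (Int × String × (List (Option Int × String × (List (String × Int))))) :=
  let by_guild : PySem.Dict Int (List (Int × String)) :=
    channel_map.foldl (fun d p =>
      if p.2 = "" then d
      else
        let gid0 := pvGetD ch_to_guild p.1 0
        let gid := if gid0 ≤ 0 then 0 else gid0
        -- by_guild.setdefault(gid, []).append((src_cid, wh_url))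
        (d.setdefault gid []).modify gid [] (fun l => l ++ [p])) PySem.Dict.empty
  (PySem.List.sorted by_guild.keys
      (fun x => PySem.Str.lower (pvGetD guild_to_name x "")) false).foldl
    (fun result gid =>
      let gname := pvGetD guild_to_name gid
        (if gid = 0 then "Unknown guild" else "Guild-" ++ PySem.Int.toStr gid)
      let grouped : PySem.Dict String (Option Int × String × List (String × Int)) :=
        (by_guild.getD gid []).foldl (fun gd p =>
          let src_name := pvGetD ch_to_name p.1 ("channel-" ++ PySem.Int.toStr p.1)
          let dn := pvGetD webhook_dest_cache p.2 (none, "?")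
          let dest_display :=
            match dn.1 with
            | some n => if n = 0 then (if dn.2 = "" then "?" else dn.2)
                        else "<#" ++ PySem.Int.toStr n ++ ">"
            | none => if dn.2 = "" then "?" else dn.2
          let key :=
            match dn.1 with
            | some n => if n = 0 then "name:" ++ dn.2 else PySem.Int.toStr n
            | none => "name:" ++ dn.2
          -- if key not in grouped_dest: grouped_dest[key] = (dest_cid, dest_display, [])
          let gd1 := if gd.contains key then gd else gd.insert key (dn.1, dest_display, [])
          -- grouped_dest[key][2].append((src_name, src_cid))  (key is present; dflt arbitrary)
          gd1.modify key (none, "?", [])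
            (fun t => (t.1, t.2.1, t.2.2 ++ [(src_name, p.1)]))) PySem.Dict.empty
      let buckets := PySem.List.sorted2 grouped.values
        (fun b => PySem.Str.lower b.2.1) (fun b => b.1.getD 0) false
      let buckets2 := buckets.map (fun b =>
        (b.1, b.2.1, PySem.List.sorted2 b.2.2 (fun s => PySem.Str.lower s.1) (fun s => s.2) false))
      result ++ [(gid, gname, buckets2)]) []

-- ===== PORT B =====
-- Port of B: one flat annotation pass into rows, then grouping by ordered dedup + filter.
def build_by_guild_alt (channel_map : List (Int × String)) (ch_to_guild : List (Int × Int)) (ch_to_name : List (Int × String)) (guild_to_name : List (Int × String)) (webhook_dest_cache : List (String × Option Int × String)) : List (Int × String × (List (Option Int × String × (List (String × Int))))) :=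
  let rows : List (Int × String × Option Int × String × String × Int) :=
    channel_map.foldl (fun rows p =>
      if p.2 = "" then rows
      else
        let gid0 := pvGetD ch_to_guild p.1 0
        let gid := if gid0 ≤ 0 then 0 else gid0
        let src_name := pvGetD ch_to_name p.1 ("channel-" ++ PySem.Int.toStr p.1)
        let dn := pvGetD webhook_dest_cache p.2 (none, "?")
        let dest_display :=
          match dn.1 with
          | some n => if n = 0 then (if dn.2 = "" then "?" else dn.2)
                      else "<#" ++ PySem.Int.toStr n ++ ">"
          | none => if dn.2 = "" then "?" else dn.2
        let key :=
          match dn.1 with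
          | some n => if n = 0 then "name:" ++ dn.2 else PySem.Int.toStr n
          | none => "name:" ++ dn.2
        rows ++ [(gid, key, dn.1, dest_display, src_name, p.1)]) []
  let gids := PySem.List.sorted (PySem.List.dedup (rows.map (fun r => r.1)))
      (fun g => PySem.Str.lower (pvGetD guild_to_name g "")) false
  gids.foldl (fun result gid =>
    let grows := rows.filter (fun r => r.1 == gid)
    let buckets := (PySem.List.dedup (grows.map (fun r => r.2.1))).foldl
      (fun buckets key =>
        let krows := grows.filter (fun r => r.2.1 == key)
        let srcs := PySem.List.sorted2 (krows.map (fun r => (r.2.2.2.2.1, r.2.2.2.2.2)))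
          (fun s => PySem.Str.lower s.1) (fun s => s.2) false
        let hd := krows.head?.getD (0, "", none, "?", "", 0)
        buckets ++ [(hd.2.2.1, hd.2.2.2.1, srcs)]) []
    let buckets2 := PySem.List.sorted2 buckets
      (fun b => PySem.Str.lower b.2.1) (fun b => b.1.getD 0) false
    let gname := pvGetD guild_to_name gid
      (if gid = 0 then "Unknown guild" else "Guild-" ++ PySem.Int.toStr gid)
    result ++ [(gid, gname, buckets2)]) []

-- ===== PRECONDITION & SPEC =====
def Spec_build_by_guild (channel_map : List (Int × String)) (ch_to_guild : List (Int × Int)) (ch_to_name : List (Int × String)) (guild_to_name : List (Int × String)) (webhook_dest_cache : List (String × Option Int × String)) (out : List (Int × String × (List (Option Int × String × (List (String × Int)))))) : Prop := out = build_by_guild_alt channel_map ch_to_guild ch_to_name guild_to_name webhook_dest_cache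
instance (channel_map : List (Int × String)) (ch_to_guild : List (Int × Int)) (ch_to_name : List (Int × String)) (guild_to_name : List (Int × String)) (webhook_dest_cache : List (String × Option Int × String)) (out : List (Int × String × (List (Option Int × String × (List (String × Int)))))) : Decidable (Spec_build_by_guild channel_map ch_to_guild ch_to_name guild_to_name webhook_dest_cache out) := by
  unfold Spec_build_by_guild
  -- instance synthesis needs a hand-built chain here (the nested product exceeds the default search size)
  letI h3 : DecidableEq (List (Option Int × String × List (String × Int))) := inferInstance
  letI h4 : DecidableEq (String × List (Option Int × String × List (String × Int))) :=
    @instDecidableEqProd _ _ _ h3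
  letI h5 : DecidableEq (Int × String × List (Option Int × String × List (String × Int))) :=
    @instDecidableEqProd _ _ _ h4
  exact @instDecidableEqList _ h5 _ _

-- ===== CLAIM (what is proved, stated in full; the proofs are below) =====
def Claim_equal_build_by_guild : Prop := ∀ (channel_map : List (Int × String)) (ch_to_guild : List (Int × Int)) (ch_to_name : List (Int × String)) (guild_to_name : List (Int × String)) (webhook_dest_cache : List (String × Option Int × String)), Dom_build_by_guild channel_map ch_to_guild ch_to_name guild_to_name webhook_dest_cache → Spec_build_by_guild channel_map ch_to_guild ch_to_name guild_to_name webhook_dest_cache (build_by_guild channel_map ch_to_guild ch_to_name guild_to_name webhook_dest_cache)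

-- ===== LEMMAS AND PROOFS =====

theorem pvFoldlSkipFilter {α β : Type} (c : α → Prop) [DecidablePred c]
    (f : β → α → β) : ∀ (l : List α) (init : β),
    l.foldl (fun acc x => if c x then acc else f acc x) init
      = (l.filter (fun x => !decide (c x))).foldl f init := by
  intro l
  induction l with
  | nil => intro init; rfl
  | cons x xs ih =>
    intro init
    by_cases h : c x <;> simp [List.filter_cons, h, ih]

theorem pvTripleFoldl {ρ : Type} (out : ρ → String × Int) :
    ∀ (l : List ρ) (a : Option Int) (b : String) (cs : List (String × Int)),
    l.foldl (fun t r => (t.1, t.2.1, t.2.2 ++ [out r])) (a, b, cs)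
      = (a, b, cs ++ l.map out) := by
  intro l
  induction l with
  | nil => simp
  | cons x xs ih => intro a b cs; simp [ih, List.foldl_cons]

theorem pvIfInsertModify {κ ν : Type} [BEq κ] [LawfulBEq κ]
    (d : PySem.Dict κ ν) (k : κ) (v0 d0 : ν) (f : ν → ν) :
    ((if d.contains k then d else d.insert k v0).modify k d0 f) = d.modify k v0 f := by
  by_cases h : d.contains k = true
  · simp only [h, if_pos]
    simp only [PySem.Dict.modify]
    rw [PySem.Dict.getD_eq_get?_getD, PySem.Dict.getD_eq_get?_getD]
    rw [PySem.Dict.contains_eq_isSome_get?] at h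
    cases o : d.get? k with
    | none => rw [o] at h; simp at h
    | some v => simp
  · simp only [Bool.not_eq_true] at h
    simp only [h, Bool.false_eq_true, if_neg, not_false_iff]
    simp only [PySem.Dict.modify, PySem.Dict.getD_insert_self,
      PySem.Dict.insert_insert_self, PySem.Dict.getD_of_not_contains d v0 h]

theorem pvSetdefaultModify {κ ν : Type} [BEq κ] [LawfulBEq κ]
    (d : PySem.Dict κ ν) (k : κ) (v0 d0 : ν) (f : ν → ν) :
    ((d.setdefault k v0).modify k d0 f) = d.modify k v0 f := by
  rw [← pvIfInsertModify d k v0 d0 f]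
  by_cases h : d.contains k = true
  · rw [PySem.Dict.setdefault_of_contains d v0 h, if_pos h]
  · simp only [Bool.not_eq_true] at h
    rw [PySem.Dict.setdefault_of_not_contains d v0 h]
    simp [h]

theorem pvMapInsertBy {α : Type} (g : α → α) (bef : α → α → Bool)
    (hbef : ∀ a b, bef (g a) (g b) = bef a b) (x : α) :
    ∀ (l : List α), (PySem.List.insertBy bef x l).map g
      = PySem.List.insertBy bef (g x) (l.map g) := by
  intro l
  induction l with
  | nil => simp [PySem.List.insertBy]
  | cons y ys ih =>
    simp only [PySem.List.insertBy, List.map_cons]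
    by_cases h : bef x y = true
    · simp [h, hbef]
    · simp only [Bool.not_eq_true] at h
      simp only [h, Bool.false_eq_true, if_neg, not_false_iff, hbef, List.map_cons]
      rw [← ih]

theorem pvMapFoldlInsertBy {α : Type} (g : α → α) (bef : α → α → Bool)
    (hbef : ∀ a b, bef (g a) (g b) = bef a b) :
    ∀ (l acc : List α),
    (l.foldl (fun acc x => PySem.List.insertBy bef x acc) acc).map g
      = (l.map g).foldl (fun acc x => PySem.List.insertBy bef x acc) (acc.map g) := by
  intro l
  induction l with
  | nil => intro acc; simp
  | cons x xs ih =>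
    intro acc
    simp only [List.foldl_cons, List.map_cons, ih, pvMapInsertBy g bef hbef]

theorem pvSorted2MapComm {α : Type} (g : α → α) (k1 : α → String) (k2 : α → Int)
    (h1 : ∀ b, k1 (g b) = k1 b) (h2 : ∀ b, k2 (g b) = k2 b) (l : List α) :
    (PySem.List.sorted2 l k1 k2 false).map g = PySem.List.sorted2 (l.map g) k1 k2 false := by
  simp only [PySem.List.sorted2]
  rw [pvMapFoldlInsertBy g _ (by intro a b; simp [h1, h2]) l []]
  rfl

theorem pvItemsModifyFoldl {κ ρ τ : Type} [BEq κ] [LawfulBEq κ]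
    (key : ρ → κ) (init : ρ → τ) (app : ρ → τ → τ) (junk : ρ) (l : List ρ) :
    (l.foldl (fun gd r => gd.modify (key r) (init r) (app r)) PySem.Dict.empty).items
      = (PySem.List.dedup (l.map key)).map (fun k =>
          (k, (l.filter (fun r => key r == k)).foldl (fun t r => app r t)
                (init ((l.find? (fun r => key r == k)).getD junk)))) := by
  induction l using List.reverseRecOn with
  | nil => rfl
  | append_singleton l r ih =>
    rw [List.foldl_append]
    simp only [List.foldl_cons, List.foldl_nil]
    set D := l.foldl (fun gd r => gd.modify (key r) (init r) (app r)) PySem.Dict.empty with hD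
    have hkeys : D.keys = PySem.List.dedup (l.map key) := by
      simp only [PySem.Dict.keys, ih, List.map_map]
      simp [Function.comp_def]
    have hnodup : D.keys.Nodup := by rw [hkeys]; exact PySem.List.nodup_dedup _
    have hval : ∀ k, k ∈ PySem.List.dedup (l.map key) →
        ∀ d0, D.getD k d0 = (l.filter (fun r => key r == k)).foldl (fun t r => app r t)
          (init ((l.find? (fun r => key r == k)).getD junk)) := by
      intro k hk d0
      apply PySem.Dict.getD_of_mem_items
      · rw [ih]; exact List.mem_map_of_mem hk
      · exact hnodup
    simp only [PySem.Dict.modify]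
    by_cases hmem : key r ∈ PySem.List.dedup (l.map key)
    · have hc : D.contains (key r) = true :=
        (PySem.Dict.contains_iff_mem_keys D (key r)).2 (hkeys ▸ hmem)
      rw [PySem.Dict.items_insert_of_contains _ _ hc, ih, List.map_map]
      have hdd : PySem.List.dedup ((l ++ [r]).map key) = PySem.List.dedup (l.map key) := by
        simp only [List.map_append, List.map_cons, List.map_nil,
          PySem.List.dedup_eq_ofList, PySem.Set.ofList_append_singleton]
        exact PySem.Set.add_of_mem (by rwa [PySem.List.dedup_eq_ofList] at hmem)
      rw [hdd]
      apply List.map_congr_left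
      intro k hk
      by_cases hkr : k = key r
      · have hbe : (k == key r) = true := by simp [hkr]
        simp only [Function.comp_def, hbe, if_pos]
        have hne : l.filter (fun r' => key r' == k) ≠ [] := by
          obtain ⟨r', hr', hkr'⟩ := List.mem_map.1 ((PySem.List.mem_dedup _ _).1 hk)
          intro hnil
          have := (List.filter_eq_nil_iff).1 hnil r' hr'
          simp [hkr'] at this
        have hfsplit : (l ++ [r]).filter (fun r' => key r' == k) =
            l.filter (fun r' => key r' == k) ++ [r] := by
          rw [List.filter_append]
          simp [hkr]
        have hfind : (l ++ [r]).find? (fun r' => key r' == k) =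
            l.find? (fun r' => key r' == k) := by
          rw [← List.head?_filter, ← List.head?_filter, hfsplit]
          cases hfl : l.filter (fun r' => key r' == k) with
          | nil => exact absurd hfl hne
          | cons a as => simp
        rw [hfsplit, hfind, List.foldl_append]
        simp only [List.foldl_cons, List.foldl_nil]
        have := hval k hk (init r)
        rw [← hkr] at *
        rw [this]
      · have hbe : (k == key r) = false := by simp [hkr]
        simp only [Function.comp_def, hbe, Bool.false_eq_true, if_neg, not_false_iff]
        have hbe2 : (key r == k) = false := beq_eq_false_iff_ne.mpr (fun h => hkr (h.symm))
        have h1 : (l ++ [r]).filter (fun r' => key r' == k) = l.filter (fun r' => key r' == k) := by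
          rw [List.filter_append]
          simp [hbe2]
        have h2 : (l ++ [r]).find? (fun r' => key r' == k) = l.find? (fun r' => key r' == k) := by
          rw [← List.head?_filter, ← List.head?_filter, h1]
        rw [h1, h2]
    · have hc : D.contains (key r) = false := by
        rw [Bool.eq_false_iff]
        intro hct
        exact hmem (hkeys ▸ (PySem.Dict.contains_iff_mem_keys D (key r)).1 hct)
      rw [PySem.Dict.items_insert_of_not_contains _ _ hc, ih,
        PySem.Dict.getD_of_not_contains _ _ hc]
      have hdd : PySem.List.dedup ((l ++ [r]).map key)
          = PySem.List.dedup (l.map key) ++ [key r] := by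
        simp only [List.map_append, List.map_cons, List.map_nil,
          PySem.List.dedup_eq_ofList, PySem.Set.ofList_append_singleton]
        exact PySem.Set.add_of_not_mem (by rwa [PySem.List.dedup_eq_ofList] at hmem)
      rw [hdd, List.map_append]
      congr 1
      · apply List.map_congr_left
        intro k hk
        have hkr : k ≠ key r := fun h => hmem (h ▸ hk)
        have hbe2 : (key r == k) = false := beq_eq_false_iff_ne.mpr (fun h => hkr h.symm)
        have h1 : (l ++ [r]).filter (fun r' => key r' == k) = l.filter (fun r' => key r' == k) := by
          rw [List.filter_append]
          simp [hbe2]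
        have h2 : (l ++ [r]).find? (fun r' => key r' == k) = l.find? (fun r' => key r' == k) := by
          rw [← List.head?_filter, ← List.head?_filter, h1]
        rw [h1, h2]
      · have hfl : l.filter (fun r' => key r' == key r) = [] := by
          rw [List.filter_eq_nil_iff]
          intro a ha hbe
          exact hmem ((PySem.List.mem_dedup _ _).2
            (List.mem_map.2 ⟨a, ha, by simpa using hbe⟩))
        have h1 : (l ++ [r]).filter (fun r' => key r' == key r) = [r] := by
          rw [List.filter_append, hfl]
          simp
        have h2 : (l ++ [r]).find? (fun r' => key r' == key r) = some r := by
          rw [← List.head?_filter, h1]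
          rfl
        simp only [List.map_cons, List.map_nil]
        rw [h1, h2]
        simp


-- proof-only abbreviations used to keep goals small
def pvDnF (wdc : List (String × Option Int × String)) (s : String) : Option Int × String :=
  pvGetD wdc s (none, "?")

def pvKeyF (wdc : List (String × Option Int × String)) (s : String) : String :=
  match (pvDnF wdc s).1 with
  | some n => if n = 0 then "name:" ++ (pvDnF wdc s).2 else PySem.Int.toStr n
  | none => "name:" ++ (pvDnF wdc s).2

def pvDispF (wdc : List (String × Option Int × String)) (s : String) : String :=
  match (pvDnF wdc s).1 with
  | some n => if n = 0 then (if (pvDnF wdc s).2 = "" then "?" else (pvDnF wdc s).2)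
              else "<#" ++ PySem.Int.toStr n ++ ">"
  | none => if (pvDnF wdc s).2 = "" then "?" else (pvDnF wdc s).2

def pvGidF (ctg : List (Int × Int)) (c : Int) : Int :=
  if pvGetD ctg c 0 ≤ 0 then 0 else pvGetD ctg c 0

def pvSnameF (ctn : List (Int × String)) (c : Int) : String :=
  pvGetD ctn c ("channel-" ++ PySem.Int.toStr c)

def pvGnameF (gtn : List (Int × String)) (g : Int) : String :=
  pvGetD gtn g (if g = 0 then "Unknown guild" else "Guild-" ++ PySem.Int.toStr g)


theorem pvDnF_def (wdc : List (String × Option Int × String)) (s : String) :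
    pvDnF wdc s = pvGetD wdc s (none, "?") := rfl
theorem pvKeyF_def (wdc : List (String × Option Int × String)) (s : String) :
    pvKeyF wdc s = match (pvDnF wdc s).1 with
      | some n => if n = 0 then "name:" ++ (pvDnF wdc s).2 else PySem.Int.toStr n
      | none => "name:" ++ (pvDnF wdc s).2 := rfl
theorem pvDispF_def (wdc : List (String × Option Int × String)) (s : String) :
    pvDispF wdc s = match (pvDnF wdc s).1 with
      | some n => if n = 0 then (if (pvDnF wdc s).2 = "" then "?" else (pvDnF wdc s).2)
                  else "<#" ++ PySem.Int.toStr n ++ ">"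
      | none => if (pvDnF wdc s).2 = "" then "?" else (pvDnF wdc s).2 := rfl
theorem pvGidF_def (ctg : List (Int × Int)) (c : Int) :
    pvGidF ctg c = if pvGetD ctg c 0 ≤ 0 then 0 else pvGetD ctg c 0 := rfl
theorem pvSnameF_def (ctn : List (Int × String)) (c : Int) :
    pvSnameF ctn c = pvGetD ctn c ("channel-" ++ PySem.Int.toStr c) := rfl
theorem pvGnameF_def (gtn : List (Int × String)) (g : Int) :
    pvGnameF gtn g = pvGetD gtn g (if g = 0 then "Unknown guild" else "Guild-" ++ PySem.Int.toStr g) := rfl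

theorem pvGroupGetD (gidf : (Int × String) → Int) (gid : Int) (l : List (Int × String)) :
    (l.foldl (fun d p => d.modify (gidf p) [] (fun s => s ++ [p])) PySem.Dict.empty).getD gid []
      = l.filter (fun p => gidf p == gid) := by
  induction l using List.reverseRecOn with
  | nil => rfl
  | append_singleton l r ih =>
    rw [List.foldl_append]
    simp only [List.foldl_cons, List.foldl_nil]
    rw [PySem.Dict.getD_modify, List.filter_append]
    by_cases h : gid = gidf r
    · subst h
      simp [← ih]
    · have : (gidf r == gid) = false := beq_eq_false_iff_ne.mpr (fun hh => h hh.symm)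
      simp [h, ih, this]


-- ===== VERDICT (by name: the statement is the Claim_ definition above) =====
set_option maxHeartbeats 2000000 in
theorem build_by_guild_spec : Claim_equal_build_by_guild := by
  intro cm ctg ctn gtn wdc _
  unfold Spec_build_by_guild
  simp only [build_by_guild, build_by_guild_alt]
  simp only [pvSetdefaultModify]
  simp only [pvFoldlSkipFilter]
  simp only [PySem.List.foldl_append_singleton_eq_map, List.nil_append]
  simp only [PySem.Dict.keys_foldl_modify_key, PySem.Dict.keys_empty,
    PySem.Set.update_nil_left, ← PySem.List.dedup_eq_ofList]
  simp only [pvGroupGetD]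
  simp only [List.filter_map, List.map_map, Function.comp_def]
  simp only [← pvDnF_def, ← pvGidF_def, ← pvSnameF_def, ← pvGnameF_def]
  simp only [← pvKeyF_def, ← pvDispF_def]
  apply List.map_congr_left
  intro gid hgid
  refine Prod.ext rfl (Prod.ext rfl ?_)
  simp only []
  rw [pvSorted2MapComm (α := Option Int × String × List (String × Int))
    (g := fun b => (b.1, b.2.1, PySem.List.sorted2 b.2.2 (fun s => PySem.Str.lower s.1) (fun s => s.2)))
    (k1 := fun b => PySem.Str.lower b.2.1) (k2 := fun b => b.1.getD 0)
    (h1 := fun _ => rfl) (h2 := fun _ => rfl)]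
  congr 1
  simp only [pvIfInsertModify]
  simp only [PySem.Dict.values]
  rw [pvItemsModifyFoldl (junk := ((0:Int), ""))]
  simp only [List.map_map, Function.comp_def]
  simp only [pvTripleFoldl, List.nil_append]
  simp only [List.head?_map, List.head?_filter]
  apply List.map_congr_left
  intro k hk
  rw [PySem.List.mem_dedup] at hk
  obtain ⟨h0, hh0, hkeq⟩ := List.mem_map.1 hk
  cases hf : List.find? (fun r => pvKeyF wdc r.2 == k)
      (List.filter (fun p => pvGidF ctg p.1 == gid)
        (List.filter (fun x => !decide (x.2 = "")) cm)) with
  | none =>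
    exfalso
    have := List.find?_eq_none.1 hf h0 hh0
    simp [hkeq] at this
  | some h =>
    simp only [hf, Option.getD_some, Option.map_some]
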